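-- pv_equiv track=rewrite | github.com/davidbard1226/makro-buybox-pro | rebuild_products.py | get_main_cat
-- ===== SOURCE A (Python) =====
-- def get_main_cat(category):
--     cat = category.lower()
--     if any(x in cat for x in ['notebook','laptop','desktop','workstation','chromebook']): return 'Laptops & Computers'
--     if any(x in cat for x in ['monitor','television','tv','interactive','display']): return 'Monitors & Displays'
--     if any(x in cat for x in ['network','access point','router','switch','wireless','wifi','firewall','modem','nas','storage','hard disk','ssd','flash','memory card']): return 'Networking & Storage'
--     if any(x in cat for x in ['printer','ink','toner','scanner']): return 'Printers & Ink'
--     if any(x in cat for x in ['headphone','earphone','speaker','microphone','webcam','camera','cctv','projector']): return 'Audio & Visual'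
--     if any(x in cat for x in ['phone','ipad','iphone','samsung','tablet','cellular']): return 'Mobile & Tablets'
--     if any(x in cat for x in ['solar','ups','battery','power bank','inverter']): return 'Power & Solar'
--     if any(x in cat for x in ['air con','kettle','microwave','vacuum','iron','humidif','fan','heater','fridge','coffee','appliance']): return 'Appliances'
--     if any(x in cat for x in ['gaming','playstation','xbox','nintendo','controller']): return 'Gaming'
--     if any(x in cat for x in ['cable','adapter','hub','charger','mouse','keyboard','bag','case','cover','stand','tool']): return 'Accessories'
--     return 'General'
-- ===== SOURCE B (Python) =====
-- # Different algorithm: instead of testing each keyword against the text, build a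
-- # keyword -> (priority, category) dictionary once and scan the lowered text's
-- # windows (one per position and keyword length), keeping the hit of minimum
-- # priority; 'General' if no window is a keyword.
-- RULES = [
--     ('Laptops & Computers', ['notebook','laptop','desktop','workstation','chromebook']),
--     ('Monitors & Displays', ['monitor','television','tv','interactive','display']),
--     ('Networking & Storage', ['network','access point','router','switch','wireless','wifi','firewall','modem','nas','storage','hard disk','ssd','flash','memory card']),
--     ('Printers & Ink', ['printer','ink','toner','scanner']),
--     ('Audio & Visual', ['headphone','earphone','speaker','microphone','webcam','camera','cctv','projector']),
--     ('Mobile & Tablets', ['phone','ipad','iphone','samsung','tablet','cellular']),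
--     ('Power & Solar', ['solar','ups','battery','power bank','inverter']),
--     ('Appliances', ['air con','kettle','microwave','vacuum','iron','humidif','fan','heater','fridge','coffee','appliance']),
--     ('Gaming', ['gaming','playstation','xbox','nintendo','controller']),
--     ('Accessories', ['cable','adapter','hub','charger','mouse','keyboard','bag','case','cover','stand','tool']),
-- ]
--
-- _KW = {}
-- for _prio, (_name, _kws) in enumerate(RULES):
--     for _k in _kws:
--         _KW[_k] = (_prio, _name)
-- _LENS = sorted({len(_k) for _k in _KW})
--
-- def get_main_cat(category):
--     cat = category.lower()
--     best = None
--     for i in range(len(cat)):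
--         for L in _LENS:
--             hit = _KW.get(cat[i:i+L])
--             if hit is not None and (best is None or hit[0] < best[0]):
--                 best = hit
--     return best[1] if best is not None else 'General'
-- ===== Notes on version B (the rewrite author's own statement) =====
-- stated objective: alternative
-- what changed: Inverts the matching: instead of testing every keyword for containment per category group with early return, B builds a keyword->(priority,category) dictionary once and scans the lowered text's windows (one per position and distinct keyword length), keeping the hit of minimum priority and falling back to the default category when no window is a keyword.
import Mathlib
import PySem

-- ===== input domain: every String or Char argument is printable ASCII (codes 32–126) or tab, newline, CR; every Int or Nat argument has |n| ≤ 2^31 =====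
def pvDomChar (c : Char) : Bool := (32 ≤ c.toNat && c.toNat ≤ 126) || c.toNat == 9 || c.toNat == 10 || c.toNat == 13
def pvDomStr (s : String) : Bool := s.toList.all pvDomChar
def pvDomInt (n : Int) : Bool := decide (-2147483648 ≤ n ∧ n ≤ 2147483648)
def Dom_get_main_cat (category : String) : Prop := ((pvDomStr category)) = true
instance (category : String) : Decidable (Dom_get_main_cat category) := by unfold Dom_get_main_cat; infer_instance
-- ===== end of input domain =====

-- B inverts the matching: a keyword -> (priority, category) dictionary built once, then a scan
-- of the lowered text's windows keeping the minimum-priority hit; objective: alternative.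

-- ===== PORT A =====
def get_main_cat (category : String) : String :=
  let cat := PySem.Str.lower category
  if (["notebook","laptop","desktop","workstation","chromebook"].any (fun x => PySem.Str.isIn x cat)) then "Laptops & Computers" else
  if (["monitor","television","tv","interactive","display"].any (fun x => PySem.Str.isIn x cat)) then "Monitors & Displays" else
  if (["network","access point","router","switch","wireless","wifi","firewall","modem","nas","storage","hard disk","ssd","flash","memory card"].any (fun x => PySem.Str.isIn x cat)) then "Networking & Storage" else
  if (["printer","ink","toner","scanner"].any (fun x => PySem.Str.isIn x cat)) then "Printers & Ink" else
  if (["headphone","earphone","speaker","microphone","webcam","camera","cctv","projector"].any (fun x => PySem.Str.isIn x cat)) then "Audio & Visual" else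
  if (["phone","ipad","iphone","samsung","tablet","cellular"].any (fun x => PySem.Str.isIn x cat)) then "Mobile & Tablets" else
  if (["solar","ups","battery","power bank","inverter"].any (fun x => PySem.Str.isIn x cat)) then "Power & Solar" else
  if (["air con","kettle","microwave","vacuum","iron","humidif","fan","heater","fridge","coffee","appliance"].any (fun x => PySem.Str.isIn x cat)) then "Appliances" else
  if (["gaming","playstation","xbox","nintendo","controller"].any (fun x => PySem.Str.isIn x cat)) then "Gaming" else
  if (["cable","adapter","hub","charger","mouse","keyboard","bag","case","cover","stand","tool"].any (fun x => PySem.Str.isIn x cat)) then "Accessories" else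
  "General"

-- ===== PORT B =====
def pvRules : List (String × List String) :=
  [("Laptops & Computers", ["notebook","laptop","desktop","workstation","chromebook"]),
   ("Monitors & Displays", ["monitor","television","tv","interactive","display"]),
   ("Networking & Storage", ["network","access point","router","switch","wireless","wifi","firewall","modem","nas","storage","hard disk","ssd","flash","memory card"]),
   ("Printers & Ink", ["printer","ink","toner","scanner"]),
   ("Audio & Visual", ["headphone","earphone","speaker","microphone","webcam","camera","cctv","projector"]),
   ("Mobile & Tablets", ["phone","ipad","iphone","samsung","tablet","cellular"]),
   ("Power & Solar", ["solar","ups","battery","power bank","inverter"]),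
   ("Appliances", ["air con","kettle","microwave","vacuum","iron","humidif","fan","heater","fridge","coffee","appliance"]),
   ("Gaming", ["gaming","playstation","xbox","nintendo","controller"]),
   ("Accessories", ["cable","adapter","hub","charger","mouse","keyboard","bag","case","cover","stand","tool"])]

-- module-level: _KW = {k: (prio, name) for prio, (name, kws) in enumerate(RULES) for k in kws}
def pvKW : PySem.Dict String (Int × String) :=
  (PySem.List.enumerate pvRules).foldl
    (fun d p => p.2.2.foldl (fun d k => d.insert k (p.1, p.2.1)) d)
    PySem.Dict.empty

-- module-level: _LENS = sorted({len(k) for k in _KW})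
def pvLens : List Int :=
  PySem.List.sorted (PySem.Set.ofList (pvKW.keys.map (fun k => (PySem.Str.len k : Int)))) (fun x => x) false

def get_main_cat_alt (category : String) : String :=
  let cat := PySem.Str.lower category
  let best := (PySem.List.pyRange 0 (PySem.Str.len cat) 1).foldl
    (fun best i => pvLens.foldl
      (fun best L =>
        match pvKW.get? (PySem.Str.slice cat (some i) (some (i + L))) with
        | some hit => if best.elim true (fun b => hit.1 < b.1) then some hit else best
        | none => best) best)
    none
  match best with
  | some b => b.2
  | none => "General"

-- ===== PRECONDITION & SPEC =====
def Spec_get_main_cat (category : String) (out : String) : Prop := out = get_main_cat_alt category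
instance (category : String) (out : String) : Decidable (Spec_get_main_cat category out) := by unfold Spec_get_main_cat; infer_instance

-- ===== CLAIM (what is proved, stated in full; the proofs are below) =====
def Claim_equal_get_main_cat : Prop := ∀ (category : String), Dom_get_main_cat category → Spec_get_main_cat category (get_main_cat category)

-- ===== LEMMAS AND PROOFS =====

-- group accessors (proof-side views of pvRules)
def pvName (g : Nat) : String := (pvRules.getD g ("", [])).1
def pvKws (g : Nat) : List String := (pvRules.getD g ("", [])).2
def pvHit (g : Nat) (cat : String) : Bool := (pvKws g).any (fun x => PySem.Str.isIn x cat)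

-- B's inner update, window strings, and the matched-entry list
def pvStep (best : Option (Int × String)) (h : Int × String) : Option (Int × String) :=
  if best.elim true (fun b => h.1 < b.1) then some h else best
def pvWnd (cat : String) (i L : Int) : String := PySem.Str.slice cat (some i) (some (i + L))
def pvW (cat : String) : List String :=
  (PySem.List.pyRange 0 (PySem.Str.len cat) 1).flatMap (fun i => pvLens.map (pvWnd cat i))
def pvM (cat : String) : List (Int × String) := (pvW cat).filterMap pvKW.get?

-- A's port is the if-chain over the group hits
theorem chainA (category : String) :
    get_main_cat category =
      (let cat := PySem.Str.lower category
       if pvHit 0 cat then pvName 0 else if pvHit 1 cat then pvName 1 else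
       if pvHit 2 cat then pvName 2 else if pvHit 3 cat then pvName 3 else
       if pvHit 4 cat then pvName 4 else if pvHit 5 cat then pvName 5 else
       if pvHit 6 cat then pvName 6 else if pvHit 7 cat then pvName 7 else
       if pvHit 8 cat then pvName 8 else if pvHit 9 cat then pvName 9 else "General") := rfl

theorem foldl_flatMap_eq {α β σ : Type} (l : List α) (f : α → List β) (g : σ → β → σ) (b : σ) :
    (l.flatMap f).foldl g b = l.foldl (fun b x => (f x).foldl g b) b := by
  induction l generalizing b with
  | nil => rfl
  | cons x xs ih => simp [List.flatMap_cons, List.foldl_append, ih]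

theorem foldl_filterMap_step (W : List String) (b : Option (Int × String)) :
    W.foldl (fun b w =>
      (match pvKW.get? w with
       | some hit => if b.elim true (fun x => hit.1 < x.1) then some hit else b
       | none => b)) b
    = (W.filterMap pvKW.get?).foldl pvStep b := by
  induction W generalizing b with
  | nil => rfl
  | cons w ws ih =>
    cases hget : pvKW.get? w <;> simp [hget, ih, pvStep]

-- B's port as a fold of pvStep over the matched entries
set_option maxRecDepth 8192 in
theorem fold_key (cat : String) :
    (PySem.List.pyRange 0 (PySem.Str.len cat) 1).foldl
      (fun best i => pvLens.foldl (fun best L =>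
        match pvKW.get? (PySem.Str.slice cat (some i) (some (i + L))) with
        | some hit => if best.elim true (fun b => hit.1 < b.1) then some hit else best
        | none => best) best) none
    = (pvM cat).foldl pvStep none := by
  unfold pvM
  rw [← foldl_filterMap_step]
  unfold pvW
  rw [foldl_flatMap_eq]
  simp only [List.foldl_map]
  rfl

theorem altB (category : String) :
    get_main_cat_alt category =
      (match (pvM (PySem.Str.lower category)).foldl pvStep none with
       | some b => b.2
       | none => "General") := by
  unfold get_main_cat_alt
  simp only [fold_key]

-- running pvStep from some b yields a minimum-priority element
theorem pvStep_run (M : List (Int × String)) (b : Int × String) :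
    ∃ c, M.foldl pvStep (some b) = some c ∧ (c = b ∨ c ∈ M) ∧ c.1 ≤ b.1 ∧ ∀ h ∈ M, c.1 ≤ h.1 := by
  induction M generalizing b with
  | nil => exact ⟨b, rfl, Or.inl rfl, le_refl _, by simp⟩
  | cons h M ih =>
    by_cases hlt : h.1 < b.1
    · obtain ⟨c, hc, hmem, hle, hall⟩ := ih h
      refine ⟨c, ?_, ?_, le_of_lt (lt_of_le_of_lt hle hlt), ?_⟩
      · simpa [pvStep, hlt] using hc
      · rcases hmem with rfl | hm
        · exact Or.inr (List.mem_cons_self)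
        · exact Or.inr (List.mem_cons_of_mem _ hm)
      · intro x hx
        rcases List.mem_cons.mp hx with rfl | hx'
        · exact hle
        · exact hall x hx'
    · obtain ⟨c, hc, hmem, hle, hall⟩ := ih b
      refine ⟨c, ?_, ?_, hle, ?_⟩
      · simpa [pvStep, hlt] using hc
      · rcases hmem with rfl | hm
        · exact Or.inl rfl
        · exact Or.inr (List.mem_cons_of_mem _ hm)
      · intro x hx
        rcases List.mem_cons.mp hx with rfl | hx'
        · exact le_trans hle (le_of_not_gt hlt)
        · exact hall x hx'

-- closed facts about the keyword dictionary (checked by the kernel)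
set_option maxRecDepth 4096 in
theorem pvItems_fact : ∀ e ∈ pvKW.items, ∃ g : Nat, g < 10 ∧ e.2 = ((g : Int), pvName g) ∧ e.1 ∈ pvKws g := by decide
set_option maxRecDepth 4096 in
theorem pvKws_fact : ∀ g : Nat, g < 10 → ∀ k ∈ pvKws g,
    pvKW.get? k = some ((g : Int), pvName g) ∧ k.toList ≠ [] ∧ ((k.toList.length : Int)) ∈ pvLens := by decide
set_option maxRecDepth 4096 in
theorem pvLens_nonneg : ∀ L ∈ pvLens, 0 ≤ L := by decide

-- every window is a substring of cat
theorem mem_W_isIn (cat : String) : ∀ w ∈ pvW cat, PySem.Str.isIn w cat = true := by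
  intro w hw
  unfold pvW at hw
  obtain ⟨i, hi, hw⟩ := List.mem_flatMap.mp hw
  obtain ⟨L, hL, rfl⟩ := List.mem_map.mp hw
  obtain ⟨hi0, _⟩ := (PySem.List.mem_pyRange_one).mp hi
  have hL0 : 0 ≤ L := pvLens_nonneg L hL
  rw [PySem.Str.isIn_iff_infix]
  have : (pvWnd cat i L).toList = PySem.List.slice cat.toList (some i) (some (i + L)) := by
    simp [pvWnd]
  rw [this, PySem.List.slice_toNat]
  · exact List.IsInfix.trans (List.IsPrefix.isInfix (List.take_prefix _ _)) (List.IsSuffix.isInfix (List.drop_suffix _ _))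
  · exact hi0
  · omega

-- every keyword of a admissible length that occurs in cat is a window
theorem isIn_mem_W (cat k : String) (hne : k.toList ≠ []) (hlen : ((k.toList.length : Int)) ∈ pvLens)
    (hin : PySem.Str.isIn k cat = true) : k ∈ pvW cat := by
  obtain ⟨t, u, hcat⟩ := (PySem.Str.isIn_iff_infix _ _).mp hin
  unfold pvW
  refine List.mem_flatMap.mpr ⟨(t.length : Int), ?_, List.mem_map.mpr ⟨(k.toList.length : Int), hlen, ?_⟩⟩
  · refine (PySem.List.mem_pyRange_one).mpr ⟨by positivity, ?_⟩
    have : cat.toList.length = t.length + k.toList.length + u.length := by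
      rw [← hcat]; simp; omega
    have hk : 0 < k.toList.length := List.length_pos_iff.mpr hne
    have hlen' : PySem.Str.len cat = cat.toList.length := by simp [PySem.Str.len]
    rw [hlen']
    omega
  · apply String.toList_inj.mp
    have : (pvWnd cat (t.length : Int) (k.toList.length : Int)).toList
        = PySem.List.slice cat.toList (some (t.length : Int)) (some ((t.length : Int) + (k.toList.length : Int))) := by
      simp [pvWnd]
    rw [this, PySem.List.slice_natCast_add]
    rw [← hcat, List.append_assoc, List.drop_left, List.take_left]

-- every matched entry is a group hit …
theorem M_elems (cat : String) : ∀ h ∈ pvM cat, ∃ g : Nat, g < 10 ∧ h = ((g : Int), pvName g) ∧ pvHit g cat = true := by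
  intro h hh
  obtain ⟨w, hwW, hget⟩ := List.mem_filterMap.mp hh
  have hmem := PySem.Dict.mem_items_of_get?_eq_some _ hget
  obtain ⟨g, hg, hpay, hkw⟩ := pvItems_fact _ hmem
  exact ⟨g, hg, hpay, List.any_eq_true.mpr ⟨w, hkw, mem_W_isIn cat w hwW⟩⟩

-- … and every group hit yields its matched entry
theorem M_of_hit (cat : String) (g : Nat) (hg : g < 10) (hhit : pvHit g cat = true) :
    ((g : Int), pvName g) ∈ pvM cat := by
  obtain ⟨k, hk, hin⟩ := List.any_eq_true.mp hhit
  obtain ⟨hget, hne, hlen⟩ := pvKws_fact g hg k hk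
  exact List.mem_filterMap.mpr ⟨k, isIn_mem_W cat k hne hlen hin, hget⟩

-- the fold returns the name of the first hit group
theorem main_min (cat : String) (g : Nat) (hg : g < 10) (hhit : pvHit g cat = true)
    (hmin : ∀ g' : Nat, g' < g → pvHit g' cat = false) :
    (match (pvM cat).foldl pvStep none with
     | some b => b.2
     | none => "General") = pvName g := by
  have hgM := M_of_hit cat g hg hhit
  cases hM : pvM cat with
  | nil => rw [hM] at hgM; cases hgM
  | cons h0 tl =>
    have hfold : List.foldl pvStep none (h0 :: tl) = tl.foldl pvStep (some h0) := rfl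
    obtain ⟨c, hc, hcm, hle, hall⟩ := pvStep_run tl h0
    have hcM : c ∈ pvM cat := by
      rw [hM]; rcases hcm with rfl | hm
      · exact List.mem_cons_self
      · exact List.mem_cons_of_mem _ hm
    obtain ⟨g', hg', hpay, hhit'⟩ := M_elems cat c hcM
    have hcg : c.1 ≤ (g : Int) := by
      rw [hM] at hgM
      rcases List.mem_cons.mp hgM with heq | hm
      · calc c.1 ≤ h0.1 := hle
          _ = (g : Int) := by rw [← heq]
      · exact hall _ hm
    have hgg' : g ≤ g' := by
      by_contra hlt
      have := hmin g' (by omega)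
      rw [this] at hhit'; cases hhit'
    have hge : g' = g := by
      have : c.1 = (g' : Int) := by rw [hpay]
      omega
    rw [hfold, hc, hpay, hge]

-- ===== VERDICT (by name: the statement is the Claim_ definition above) =====
set_option maxHeartbeats 1000000 in
theorem get_main_cat_spec : Claim_equal_get_main_cat := by
  intro category _
  unfold Spec_get_main_cat
  rw [chainA, altB]
  simp only []
  set cat := PySem.Str.lower category with hcat
  by_cases h0 : pvHit 0 cat = true
  · simp only [h0, if_true]
    exact (main_min cat 0 (by omega) h0 (by intro g' hg'; omega)).symm
  rw [Bool.not_eq_true] at h0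
  by_cases h1 : pvHit 1 cat = true
  · simp only [h0, h1, Bool.false_eq_true, if_false, if_true]
    exact (main_min cat 1 (by omega) h1 (by
        intro g' hg'
        match g' with
        | 0 => exact h0
        | m+1 => omega)).symm
  rw [Bool.not_eq_true] at h1
  by_cases h2 : pvHit 2 cat = true
  · simp only [h0, h1, h2, Bool.false_eq_true, if_false, if_true]
    exact (main_min cat 2 (by omega) h2 (by
        intro g' hg'
        match g' with
        | 0 => exact h0
        | 1 => exact h1
        | m+2 => omega)).symm
  rw [Bool.not_eq_true] at h2
  by_cases h3 : pvHit 3 cat = true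
  · simp only [h0, h1, h2, h3, Bool.false_eq_true, if_false, if_true]
    exact (main_min cat 3 (by omega) h3 (by
        intro g' hg'
        match g' with
        | 0 => exact h0
        | 1 => exact h1
        | 2 => exact h2
        | m+3 => omega)).symm
  rw [Bool.not_eq_true] at h3
  by_cases h4 : pvHit 4 cat = true
  · simp only [h0, h1, h2, h3, h4, Bool.false_eq_true, if_false, if_true]
    exact (main_min cat 4 (by omega) h4 (by
        intro g' hg'
        match g' with
        | 0 => exact h0
        | 1 => exact h1
        | 2 => exact h2
        | 3 => exact h3
        | m+4 => omega)).symm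
  rw [Bool.not_eq_true] at h4
  by_cases h5 : pvHit 5 cat = true
  · simp only [h0, h1, h2, h3, h4, h5, Bool.false_eq_true, if_false, if_true]
    exact (main_min cat 5 (by omega) h5 (by
        intro g' hg'
        match g' with
        | 0 => exact h0
        | 1 => exact h1
        | 2 => exact h2
        | 3 => exact h3
        | 4 => exact h4
        | m+5 => omega)).symm
  rw [Bool.not_eq_true] at h5
  by_cases h6 : pvHit 6 cat = true
  · simp only [h0, h1, h2, h3, h4, h5, h6, Bool.false_eq_true, if_false, if_true]
    exact (main_min cat 6 (by omega) h6 (by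
        intro g' hg'
        match g' with
        | 0 => exact h0
        | 1 => exact h1
        | 2 => exact h2
        | 3 => exact h3
        | 4 => exact h4
        | 5 => exact h5
        | m+6 => omega)).symm
  rw [Bool.not_eq_true] at h6
  by_cases h7 : pvHit 7 cat = true
  · simp only [h0, h1, h2, h3, h4, h5, h6, h7, Bool.false_eq_true, if_false, if_true]
    exact (main_min cat 7 (by omega) h7 (by
        intro g' hg'
        match g' with
        | 0 => exact h0
        | 1 => exact h1
        | 2 => exact h2
        | 3 => exact h3
        | 4 => exact h4
        | 5 => exact h5
        | 6 => exact h6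
        | m+7 => omega)).symm
  rw [Bool.not_eq_true] at h7
  by_cases h8 : pvHit 8 cat = true
  · simp only [h0, h1, h2, h3, h4, h5, h6, h7, h8, Bool.false_eq_true, if_false, if_true]
    exact (main_min cat 8 (by omega) h8 (by
        intro g' hg'
        match g' with
        | 0 => exact h0
        | 1 => exact h1
        | 2 => exact h2
        | 3 => exact h3
        | 4 => exact h4
        | 5 => exact h5
        | 6 => exact h6
        | 7 => exact h7
        | m+8 => omega)).symm
  rw [Bool.not_eq_true] at h8
  by_cases h9 : pvHit 9 cat = true
  · simp only [h0, h1, h2, h3, h4, h5, h6, h7, h8, h9, Bool.false_eq_true, if_false, if_true]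
    exact (main_min cat 9 (by omega) h9 (by
        intro g' hg'
        match g' with
        | 0 => exact h0
        | 1 => exact h1
        | 2 => exact h2
        | 3 => exact h3
        | 4 => exact h4
        | 5 => exact h5
        | 6 => exact h6
        | 7 => exact h7
        | 8 => exact h8
        | m+9 => omega)).symm
  rw [Bool.not_eq_true] at h9
  have hnil : pvM cat = [] := by
    rw [List.eq_nil_iff_forall_not_mem]
    intro h hh
    obtain ⟨g, hg, _, hhit⟩ := M_elems cat h hh
    interval_cases g <;> simp_all
  simp only [h0, h1, h2, h3, h4, h5, h6, h7, h8, h9, Bool.false_eq_true, if_false, hnil,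
    List.foldl_nil]
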